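-- pv_equiv track=rewrite | github.com/samuelleyton2006/Proyecto-Analizador-Lexico-Primer-Corte | PruebaDos/AnalizadorLexico.py | automata_cadena
-- ===== SOURCE A (Python) =====
-- def automata_cadena(linea, pos):
--     if linea[pos] == '"' or linea[pos] == "'":
--         comilla = linea[pos]
--         lexema = comilla
--         i = pos + 1
--         while i < len(linea):
--             if linea[i] == '\\' and i + 1 < len(linea):
--                 lexema += linea[i] + linea[i+1]
--                 i += 2
--             elif linea[i] == comilla:
--                 lexema += comilla
--                 return lexema, i - pos + 1
--             else:
--                 lexema += linea[i]
--                 i += 1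
--     return None, 0
-- ===== SOURCE B (Python) =====
-- import re
--
-- def automata_cadena(linea, pos):
--     q = linea[pos]  # same IndexError as the original on out-of-range pos
--     if q == '"' or q == "'":
--         pat = re.compile(re.escape(q) + r'(?:\\.|[^\\' + q + r'])*' + re.escape(q), re.DOTALL)
--         m = pat.match(linea, pos)
--         if m:
--             return m.group(), m.end() - pos
--     return None, 0
-- ===== Notes on version B (the rewrite author's own statement) =====
-- stated objective: idiomatic
-- what changed: The hand-rolled character loop with string accumulation is replaced by a single compiled regex q(?:\\.|[^\\q])*q matched at pos with re.DOTALL, returning m.group() and m.end()-pos.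
-- outside the precondition, e.g. on automata_cadena('a"b"', -3): A returns ('"b"', 3), B returns (None, 0); on automata_cadena('ab', 5): A raises IndexError, B raises IndexError
import Mathlib
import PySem

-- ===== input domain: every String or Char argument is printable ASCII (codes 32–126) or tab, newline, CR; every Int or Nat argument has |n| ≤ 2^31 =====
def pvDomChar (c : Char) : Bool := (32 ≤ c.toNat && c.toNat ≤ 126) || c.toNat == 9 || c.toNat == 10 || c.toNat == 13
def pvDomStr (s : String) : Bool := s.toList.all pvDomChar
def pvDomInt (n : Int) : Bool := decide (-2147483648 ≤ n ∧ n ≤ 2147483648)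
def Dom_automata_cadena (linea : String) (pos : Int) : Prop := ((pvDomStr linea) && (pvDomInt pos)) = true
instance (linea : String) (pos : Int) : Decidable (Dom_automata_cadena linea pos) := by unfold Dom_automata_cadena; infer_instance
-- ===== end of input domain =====

-- B replaces the hand-rolled character loop by a regex that encodes the same string-literal
-- grammar (idiomatic; measured speed difference not claimed).

-- ===== PORT A =====
-- A's while-loop: accumulates the lexeme character by character in `lex`; the index `i`
-- stays an Int and linea[i] is pyGet? (Python's negative-index wraparound), as in the source.
def autoCadLoopA (cs : List Char) (q : Char) (lex : List Char) (pos i : Int) :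
    Option String × Int :=
  if h : i < (cs.length : Int) then
    match PySem.List.pyGet? cs i with
    | none => (none, 0)   -- IndexError; unreachable from automata_cadena (i > pos ≥ -len)
    | some c =>
      if c = '\\' ∧ i + 1 < (cs.length : Int) then
        match PySem.List.pyGet? cs (i+1) with
        | none => (none, 0)   -- unreachable: i + 1 < len and i + 1 > -len
        | some c2 => autoCadLoopA cs q (lex ++ [c, c2]) pos (i+2)
      else if c = q then
        (some (String.ofList (lex ++ [q])), i - pos + 1)
      else
        autoCadLoopA cs q (lex ++ [c]) pos (i+1)
  else (none, 0)
termination_by ((cs.length : Int) - i).toNat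
decreasing_by all_goals (simp at h ⊢; omega)

def automata_cadena (linea : String) (pos : Int) : Option String × Int :=
  match PySem.Str.pyGet? linea pos with
  | some c =>
      if c = '"' ∨ c = '\'' then
        autoCadLoopA linea.toList c [c] pos (pos + 1)
      else (none, 0)
  | none => (none, 0)   -- Python raises IndexError here; excluded by Pre_

-- ===== PORT B =====
-- Hand-port (exact, deterministic) of matching the regex  q(?:\\.|[^\\q])*q  with re.DOTALL:
-- returns the end position of the match of  (?:\\.|[^\\q])*q  starting at j, or none.
def autoCadReTail (cs : List Char) (q : Char) (j : Nat) : Option Nat :=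
  if h : j < cs.length then
    if cs[j] = '\\' then
      if j + 1 < cs.length then autoCadReTail cs q (j+2) else none
    else if cs[j] = q then some (j+1)
    else autoCadReTail cs q (j+1)
  else none
termination_by cs.length - j

-- pat.match(linea, p): the pattern must first match the leading quote at p.
def autoCadReMatch (cs : List Char) (q : Char) (p : Nat) : Option Nat :=
  if h : p < cs.length then
    if cs[p] = q then autoCadReTail cs q (p+1) else none
  else none

def automata_cadena_alt (linea : String) (pos : Int) : Option String × Int :=
  match PySem.Str.pyGet? linea pos with
  | some q =>
      if q = '"' ∨ q = '\'' then
        match autoCadReMatch linea.toList q pos.toNat with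
        | some e =>   -- m.group() = linea[pos:e],  m.end() - pos = e - pos
            (some (String.ofList ((linea.toList.drop pos.toNat).take (e - pos.toNat))),
             (e : Int) - pos)
        | none => (none, 0)
      else (none, 0)
  | none => (none, 0)   -- Python raises IndexError here; excluded by Pre_

-- ===== PRECONDITION & SPEC =====
-- Pre_ excludes (a) pos out of range, where A raises IndexError, and (b) negative in-range pos
-- pointing at a quote character, where A's value is an accident of Python's negative-index
-- wraparound (the scan restarts at the start of the string once i reaches 0) while B's regex
-- matches at the clamped literal offset.  Negative in-range pos at a NON-quote is admitted
-- (both sides return (none, 0)).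
def Pre_automata_cadena (linea : String) (pos : Int) : Prop :=
  (0 ≤ pos ∧ pos < (linea.toList.length : Int)) ∨
  (pos < 0 ∧ PySem.Str.pyGet? linea pos ≠ none ∧
    PySem.Str.pyGet? linea pos ≠ some '"' ∧ PySem.Str.pyGet? linea pos ≠ some '\'')
instance (linea : String) (pos : Int) : Decidable (Pre_automata_cadena linea pos) := by
  unfold Pre_automata_cadena; infer_instance

def pvWitness_automata_cadena : String × Int := ("x = 'ab\\'c' + y", 4)

def Spec_automata_cadena (linea : String) (pos : Int) (out : Option String × Int) : Prop :=
  out = automata_cadena_alt linea pos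
instance (linea : String) (pos : Int) (out : Option String × Int) :
    Decidable (Spec_automata_cadena linea pos out) := by
  unfold Spec_automata_cadena; infer_instance

-- ===== CLAIM (what is proved, stated in full; the proofs are below) =====
def Claim_equal_automata_cadena : Prop :=
  ∀ (linea : String) (pos : Int), Dom_automata_cadena linea pos →
    Pre_automata_cadena linea pos →
    Spec_automata_cadena linea pos (automata_cadena linea pos)

-- ===== LEMMAS AND PROOFS =====

lemma autoCadTake (cs : List Char) (pos k : Nat) (hk : k < cs.length) (hpk : pos ≤ k) :
    (cs.drop pos).take (k - pos) ++ [cs[k]] = (cs.drop pos).take (k + 1 - pos) := by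
  have h1 : k - pos < (cs.drop pos).length := by
    simp only [List.length_drop]; omega
  have h2 : (cs.drop pos)[k - pos]'h1 = cs[k] := by
    rw [List.getElem_drop]; congr 1; omega
  have h3 := List.take_concat_get h1
  rw [← h2, ← List.concat_eq_append, h3]
  congr 1; omega

-- Loop invariant: with the lexeme accumulated so far equal to cs[pos:i], A's loop returns
-- exactly what B computes from the regex tail-match starting at i (q is a quote, not '\\').
lemma autoCad_loop_eq (cs : List Char) (q : Char) (hqne : q ≠ '\\') :
    ∀ n pos i : Nat, cs.length - i ≤ n → pos ≤ i →
      autoCadLoopA cs q ((cs.drop pos).take (i - pos)) (pos : Int) (i : Int) =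
        (match autoCadReTail cs q i with
         | some e => (some (String.ofList ((cs.drop pos).take (e - pos))), (e : Int) - (pos : Int))
         | none => ((none : Option String), (0 : Int))) := by
  intro n
  induction n with
  | zero =>
      intro pos i hn hpi
      have hge : cs.length ≤ i := by omega
      rw [autoCadLoopA, autoCadReTail]
      have : ¬ ((i : Int) < (cs.length : Int)) := by exact_mod_cast Nat.not_lt.mpr hge
      rw [dif_neg this, dif_neg (Nat.not_lt.mpr hge)]
  | succ n ih =>
      intro pos i hn hpi
      by_cases h : i < cs.length
      · rw [autoCadLoopA, autoCadReTail]
        have hci : PySem.List.pyGet? cs (i : Int) = some cs[i] := by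
          simp [h]
        rw [dif_pos (show ((i : Int)) < (cs.length : Int) from by exact_mod_cast h), hci,
          dif_pos h]
        dsimp only
        by_cases hb : cs[i] = '\\'
        · have hiq : ¬ cs[i] = q := by rw [hb]; exact fun hc => hqne hc.symm
          by_cases hb2 : i + 1 < cs.length
          · -- escape: both consume two characters
            have hci1 : PySem.List.pyGet? cs ((i : Int) + 1) = some cs[i+1] := by
              have h1 : ((i : Int) + 1) = ((i + 1 : Nat) : Int) := by push_cast; ring
              rw [h1, PySem.List.pyGet?_natCast, List.getElem?_eq_getElem hb2]
            have hlex : (cs.drop pos).take (i - pos) ++ [cs[i], cs[i+1]]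
                = (cs.drop pos).take (i + 2 - pos) := by
              calc (cs.drop pos).take (i - pos) ++ [cs[i], cs[i+1]]
                  = ((cs.drop pos).take (i - pos) ++ [cs[i]]) ++ [cs[i+1]] := by simp
                _ = (cs.drop pos).take (i + 1 - pos) ++ [cs[i+1]] := by
                    rw [autoCadTake cs pos i h hpi]
                _ = (cs.drop pos).take (i + 1 + 1 - pos) :=
                    autoCadTake cs pos (i+1) hb2 (by omega)
                _ = (cs.drop pos).take (i + 2 - pos) := rfl
            rw [if_pos ⟨hb, show ((i : Int) + 1) < (cs.length : Int) from by exact_mod_cast hb2⟩,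
              if_pos hb, if_pos hb2, hci1]
            dsimp only
            rw [hlex, show ((i : Int) + 2) = ((i + 2 : Nat) : Int) from by push_cast; ring]
            exact ih pos (i+2) (by omega) (by omega)
          · -- lone backslash at the end: A appends it and loops once more; regex tail fails
            have hnc : ¬ (cs[i] = '\\' ∧ ((i : Int) + 1 < (cs.length : Int))) := by
              rintro ⟨-, hc⟩; exact hb2 (by exact_mod_cast hc)
            rw [if_neg hnc, if_neg hiq, if_pos hb, if_neg hb2, autoCadTake cs pos i h hpi,
              show ((i : Int) + 1) = ((i + 1 : Nat) : Int) from by push_cast; ring,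
              ih pos (i+1) (by omega) (by omega), autoCadReTail]
            have hi1 : i + 1 = cs.length := by omega
            simp [hi1]
        · have hnc : ¬ (cs[i] = '\\' ∧ ((i : Int) + 1 < (cs.length : Int))) := by
            rintro ⟨hc, -⟩; exact hb hc
          rw [if_neg hnc, if_neg hb]
          by_cases hq : cs[i] = q
          · -- closing quote: A returns lex ++ [q]; regex match ends at i+1
            rw [if_pos hq, if_pos hq]
            have hl : (cs.drop pos).take (i - pos) ++ [q] = (cs.drop pos).take (i + 1 - pos) := by
              rw [← hq]; exact autoCadTake cs pos i h hpi
            have h2 : ((i : Int) - (pos : Int) + 1) = ((i + 1 : Nat) : Int) - (pos : Int) := by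
              push_cast; ring
            rw [hl, h2]
          · rw [if_neg hq, if_neg hq, autoCadTake cs pos i h hpi,
              show ((i : Int) + 1) = ((i + 1 : Nat) : Int) from by push_cast; ring]
            exact ih pos (i+1) (by omega) (by omega)
      · rw [autoCadLoopA, autoCadReTail]
        have : ¬ ((i : Int) < (cs.length : Int)) := by exact_mod_cast h
        rw [dif_neg this, dif_neg h]

-- ===== VERDICT (by name: the statement is the Claim_ definition above) =====
theorem automata_cadena_spec : Claim_equal_automata_cadena := by
  intro linea pos _hdom hpre
  rcases hpre with ⟨h0, hlt⟩ | ⟨hneg, hne, hq1, hq2⟩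
  case inr =>
    -- negative in-range pos at a non-quote character: both sides return (none, 0)
    unfold Spec_automata_cadena automata_cadena automata_cadena_alt
    cases hg : PySem.Str.pyGet? linea pos with
    | none => exact absurd hg hne
    | some c =>
        rw [hg] at hq1 hq2
        have hcq : ¬ (c = '"' ∨ c = '\'') := by
          rintro (rfl | rfl)
          · exact hq1 rfl
          · exact hq2 rfl
        dsimp only
        rw [if_neg hcq, if_neg hcq]
  obtain ⟨p, rfl⟩ : ∃ p : Nat, pos = (p : Int) := ⟨pos.toNat, (Int.toNat_of_nonneg h0).symm⟩
  unfold Spec_automata_cadena automata_cadena automata_cadena_alt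
  set cs := linea.toList with hcs
  have hp : p < cs.length := by exact_mod_cast hlt
  have hget : PySem.Str.pyGet? linea (p : Int) = some cs[p] := by
    rw [PySem.Str.pyGet?_natCast, List.getElem?_eq_getElem hp]
  rw [hget]
  dsimp only
  simp only [Int.toNat_natCast]
  by_cases hq : cs[p] = '"' ∨ cs[p] = '\''
  · have hqne : cs[p] ≠ '\\' := by rcases hq with h | h <;> simp [h]
    rw [if_pos hq, if_pos hq]
    have hfirst : [cs[p]] = (cs.drop p).take (p + 1 - p) := by
      rw [show p + 1 - p = 1 from by omega, List.drop_eq_getElem_cons hp]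
      rfl
    rw [hfirst, show ((p : Int) + 1) = ((p + 1 : Nat) : Int) from by push_cast; ring,
      autoCad_loop_eq cs cs[p] hqne cs.length p (p + 1) (by omega) (by omega)]
    unfold autoCadReMatch
    rw [dif_pos hp, if_pos rfl]
  · rw [if_neg hq, if_neg hq]
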